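-- pv_equiv track=rewrite | github.com/manartrimeche/AMT-Rose-Blanche | rag_semantic_search.py | _split_md_sections
-- ===== SOURCE A (Python) =====
-- def _split_md_sections(text: str) -> list[tuple[str, str]]:
--     """Split a Markdown file into (section_title, section_body) pairs."""
--     sections: list[tuple[str, str]] = []
--     current_title = "Introduction"
--     current_lines: list[str] = []
--
--     for line in text.splitlines():
--         if line.startswith("#"):
--             # flush previous section
--             body = "\n".join(current_lines).strip()
--             if body:
--                 sections.append((current_title, body))
--             current_title = line.lstrip("# ").strip()
--             current_lines = []
--         else:
--             current_lines.append(line)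
--
--     # flush last section
--     body = "\n".join(current_lines).strip()
--     if body:
--         sections.append((current_title, body))
--
--     return sections
-- ===== SOURCE B (Python) =====
-- def _split_md_sections(text: str) -> list[tuple[str, str]]:
--     """Split a Markdown file into (section_title, section_body) pairs.
--
--     Segment-wise second pass: scan forward to each header line, emit the
--     segment between headers directly, instead of accumulating and flushing.
--     """
--     lines = text.splitlines()
--     n = len(lines)
--     out: list[tuple[str, str]] = []
--     title = "Introduction"
--     j = 0
--     while True:
--         i = j
--         while i < n and not lines[i].startswith("#"):
--             i += 1
--         body = "\n".join(lines[j:i]).strip()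
--         if body:
--             out.append((title, body))
--         if i == n:
--             return out
--         title = lines[i].lstrip("# ").strip()
--         j = i + 1
-- ===== Notes on version B (the rewrite author's own statement) =====
-- stated objective: alternative
-- what changed: Replaces A's accumulate-lines-and-flush-on-header loop with a segment-wise scan that finds the next header line and emits each (title, body) pair directly from the slice between consecutive headers.
import Mathlib
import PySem

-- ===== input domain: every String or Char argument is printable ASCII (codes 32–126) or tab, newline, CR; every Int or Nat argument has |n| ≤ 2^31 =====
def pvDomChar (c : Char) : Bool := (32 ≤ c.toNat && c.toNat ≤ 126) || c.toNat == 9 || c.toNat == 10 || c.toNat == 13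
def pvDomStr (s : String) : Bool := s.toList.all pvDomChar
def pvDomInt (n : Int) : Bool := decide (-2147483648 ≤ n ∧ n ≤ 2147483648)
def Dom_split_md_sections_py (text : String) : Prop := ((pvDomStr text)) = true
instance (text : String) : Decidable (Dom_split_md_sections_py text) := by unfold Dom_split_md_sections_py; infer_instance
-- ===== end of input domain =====

-- B replaces A's accumulate-and-flush loop by a segment-wise scan that emits each
-- (title, body) pair directly from the slice between consecutive header lines
-- (objective: alternative decomposition, same cost).

-- line.lstrip("# ").strip()  — lstrip("# ") drops the chars {'#', ' '} from the left (exact);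
-- shared by both ports because both Pythons contain this exact expression.
def pvTitleOf (line : String) : String :=
  PySem.Str.strip (String.ofList (line.toList.dropWhile (fun c => c == '#' || c == ' ')))

-- ===== PORT A =====
-- the flush step: body = "\n".join(cur).strip(); if body: sections.append((title, body))
def pvFlushA (st : List (String × String) × String × List String) : List (String × String) :=
  let body := PySem.Str.strip (PySem.Str.join "\n" st.2.2)
  if body ≠ "" then st.1 ++ [(st.2.1, body)] else st.1

-- the for-loop over text.splitlines() with state (sections, current_title, current_lines)
def pvLoopA : List String → List (String × String) × String × List String →
    List (String × String) × String × List String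
  | [], st => st
  | line :: rest, (secs, title, cur) =>
    if PySem.Str.startswith line "#" then
      let body := PySem.Str.strip (PySem.Str.join "\n" cur)
      pvLoopA rest ((if body ≠ "" then secs ++ [(title, body)] else secs), pvTitleOf line, [])
    else
      pvLoopA rest (secs, title, cur ++ [line])

def split_md_sections_py (text : String) : List (String × String) :=
  pvFlushA (pvLoopA (PySem.Str.splitlines text) ([], "Introduction", []))

-- ===== PORT B =====
-- Source B's inner while advances i from j to the first header line; lines[j:i] and lines[i:]
-- are rendered as the prefix/suffix split of the remaining suffix of lines.
def pvSplitHdr : List String → List String × List String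
  | [] => ([], [])
  | l :: ls =>
    if PySem.Str.startswith l "#" then ([], l :: ls)
    else
      let p := pvSplitHdr ls
      (l :: p.1, p.2)

theorem pvSplitHdr_snd_le (ls : List String) : (pvSplitHdr ls).2.length ≤ ls.length := by
  induction ls with
  | nil => simp [pvSplitHdr]
  | cons l ls ih =>
    simp only [pvSplitHdr]
    split
    · simp
    · simpa using Nat.le_succ_of_le ih

-- Source B's outer while loop: one iteration per segment
def pvLoopB (title : String) (lines : List String) (out : List (String × String)) :
    List (String × String) :=
  let pre := (pvSplitHdr lines).1
  let body := PySem.Str.strip (PySem.Str.join "\n" pre)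
  let out' := if body ≠ "" then out ++ [(title, body)] else out
  match _hr : (pvSplitHdr lines).2 with
  | [] => out'
  | h :: t => pvLoopB (pvTitleOf h) t out'
termination_by lines.length
decreasing_by
  have hle := pvSplitHdr_snd_le lines
  rw [_hr] at hle
  simp at hle
  omega

def split_md_sections_py_alt (text : String) : List (String × String) :=
  pvLoopB "Introduction" (PySem.Str.splitlines text) []

-- ===== PRECONDITION & SPEC =====
def Spec_split_md_sections_py (text : String) (out : List (String × String)) : Prop := out = split_md_sections_py_alt text
instance (text : String) (out : List (String × String)) : Decidable (Spec_split_md_sections_py text out) := by unfold Spec_split_md_sections_py; infer_instance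

-- ===== CLAIM (what is proved, stated in full; the proofs are below) =====
def Claim_equal_split_md_sections_py : Prop := ∀ (text : String), Dom_split_md_sections_py text → Spec_split_md_sections_py text (split_md_sections_py text)

-- ===== LEMMAS AND PROOFS =====

-- one segment of B, with the lines `cur` already collected by A prepended to the body
def pvSeg (title : String) (cur : List String) (lines : List String)
    (acc : List (String × String)) : List (String × String) :=
  let p := pvSplitHdr lines
  let body := PySem.Str.strip (PySem.Str.join "\n" (cur ++ p.1))
  let acc' := if body ≠ "" then acc ++ [(title, body)] else acc
  match p.2 with
  | [] => acc'
  | h :: t => pvLoopB (pvTitleOf h) t acc'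

theorem pvLoopB_eq_seg (title : String) (lines : List String) (out : List (String × String)) :
    pvLoopB title lines out = pvSeg title [] lines out := by
  rw [pvLoopB.eq_def]
  rcases h2 : (pvSplitHdr lines).2 with _ | ⟨h, t⟩ <;> simp [pvSeg, h2]

theorem pvLoopA_eq_seg (lines : List String) :
    ∀ (title : String) (cur : List String) (acc : List (String × String)),
      pvFlushA (pvLoopA lines (acc, title, cur)) = pvSeg title cur lines acc := by
  induction lines with
  | nil =>
    intro title cur acc
    simp [pvLoopA, pvSeg, pvSplitHdr, pvFlushA]
  | cons l ls ih =>
    intro title cur acc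
    by_cases hsw : PySem.Str.startswith l "#" = true
    · have e1 : pvSplitHdr (l :: ls) = ([], l :: ls) := by
        simp only [pvSplitHdr, hsw, if_pos]
      simp only [pvLoopA, hsw, if_pos, ih]
      conv_rhs => rw [pvSeg]
      simp only [e1, List.append_nil]
      rw [pvLoopB_eq_seg]
    · have e1 : pvSplitHdr (l :: ls) = (l :: (pvSplitHdr ls).1, (pvSplitHdr ls).2) := by
        simp only [pvSplitHdr, hsw, if_neg, Bool.false_eq_true, not_false_iff]
      simp only [pvLoopA, hsw, Bool.false_eq_true, if_neg, not_false_iff, ih]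
      conv_rhs => rw [pvSeg]
      rw [pvSeg]
      simp only [e1]
      have : cur ++ l :: (pvSplitHdr ls).1 = (cur ++ [l]) ++ (pvSplitHdr ls).1 := by simp
      rw [this]

-- ===== VERDICT (by name: the statement is the Claim_ definition above) =====
theorem split_md_sections_py_spec : Claim_equal_split_md_sections_py := by
  intro text _
  show split_md_sections_py text = split_md_sections_py_alt text
  rw [split_md_sections_py, split_md_sections_py_alt, pvLoopA_eq_seg, pvLoopB_eq_seg]
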